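-- pv_equiv track=rewrite | github.com/Aubinx/TIPE-2021-Error-Correcting-Code | Programmes/TIPE.py | convertisseur_jpeg_vers_binaire
-- ===== SOURCE A (Python) =====
-- def conv_binaire(n):#Convertit un entier naturel de [0,255] en binaire avec la division euclidienne
--     B=[]
--     N=n
--     for i in range(8):
--         r = N%2
--         N = N//2
--         B.append(r)
--     list.reverse(B)
--     return(B)
--
-- def convertisseur_jpeg_vers_binaire(L): #Convertit des listes d'images en format jpeg en liste de listes binaires (un binaire entre 0 et 255 est codé par une liste de 0 et de 1 de longueur 8)
--     hau=len(L)
--     lar=len(L[0])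
--     M=[]
--     for i in range(hau):
--         M.append([])
--         for j in range(lar):
--             M[i].append([0,0,0])
--             for k in range(3):
--                 M[i][j][k]=conv_binaire(L[i][j][k])
--     return(M)
-- ===== SOURCE B (Python) =====
-- def conv8(v):
--     # 8-bit big-endian binary representation of v
--     return [v // 2**s % 2 for s in range(7, -1, -1)]
--
-- def convertisseur_jpeg_vers_binaire(L):
--     hau, lar = len(L), len(L[0])
--     return [[[conv8(L[i][j][k]) for k in range(3)]
--              for j in range(lar)]
--             for i in range(hau)]
-- ===== Notes on version B (the rewrite author's own statement) =====
-- stated objective: simpler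
-- what changed: Replaces the index-mutating triple loop with placeholder pixels and the append-and-reverse euclidean-division loop by nested comprehensions over the image dimensions mapping a direct bit-extraction formula per channel; Pre_ excludes only the inputs on which A raises IndexError (empty list, a row shorter than the first, a scanned pixel with fewer than 3 channels), where B raises too.
import Mathlib
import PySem

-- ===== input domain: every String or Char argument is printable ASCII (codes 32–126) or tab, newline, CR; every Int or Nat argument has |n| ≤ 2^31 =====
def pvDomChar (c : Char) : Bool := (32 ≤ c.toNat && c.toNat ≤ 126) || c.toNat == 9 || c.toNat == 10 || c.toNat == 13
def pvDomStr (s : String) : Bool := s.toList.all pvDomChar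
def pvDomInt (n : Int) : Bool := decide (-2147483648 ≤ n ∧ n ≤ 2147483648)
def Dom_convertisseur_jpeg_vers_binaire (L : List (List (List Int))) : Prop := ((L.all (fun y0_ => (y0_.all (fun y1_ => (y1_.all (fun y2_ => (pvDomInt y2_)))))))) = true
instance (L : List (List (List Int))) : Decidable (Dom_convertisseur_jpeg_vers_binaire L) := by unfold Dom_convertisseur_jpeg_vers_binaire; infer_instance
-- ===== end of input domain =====

-- B replaces the index-mutating triple loop with placeholder pixels and the append-and-reverse
-- division loop by nested comprehensions over the image dimensions and a direct bit-extraction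
-- formula (objective: simpler).

-- ===== PORT A =====
def conv_binaire (n : Int) : List Int :=
  let st := (PySem.List.pyRange 0 8 1).foldl (fun (st : List Int × Int) _ =>
    let r := PySem.Int.mod st.2 2
    let N := PySem.Int.floordiv st.2 2
    (st.1 ++ [r], N)) (([] : List Int), n)
  st.1.reverse

def convertisseur_jpeg_vers_binaire (L : List (List (List Int))) : List (List (List (List Int))) :=
  let hau : Int := L.length
  let lar : Int := (PySem.List.pyGetD L 0 []).length   -- len(L[0]); Pre_ guarantees L ≠ []
  (PySem.List.pyRange 0 hau 1).foldl (fun M i =>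
    let M := M ++ [([] : List (List (List Int)))]
    (PySem.List.pyRange 0 lar 1).foldl (fun M j =>
      -- Python appends the placeholder [0,0,0], whose int slots Lean's element type cannot hold;
      -- ported as [[],[],[]] — all three slots are overwritten by the k-loop below
      let M := PySem.List.pySetD M i (PySem.List.pyGetD M i [] ++ [[[],[],[]]])
      (PySem.List.pyRange 0 3 1).foldl (fun M k =>
        let row := PySem.List.pyGetD M i []
        let px := PySem.List.pyGetD row j []
        let v := PySem.List.pyGetD (PySem.List.pyGetD (PySem.List.pyGetD L i []) j []) k 0
        PySem.List.pySetD M i (PySem.List.pySetD row j (PySem.List.pySetD px k (conv_binaire v)))) M) M) []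

-- ===== PORT B =====
def conv8 (v : Int) : List Int :=
  -- [v // 2**s % 2 for s in range(7, -1, -1)]; every s in the range is nonnegative, so 2**s is 2 ^ s.toNat
  (PySem.List.pyRange 7 (-1) (-1)).map (fun s => PySem.Int.mod (PySem.Int.floordiv v ((2:Int) ^ s.toNat)) 2)

def convertisseur_jpeg_vers_binaire_alt (L : List (List (List Int))) : List (List (List (List Int))) :=
  let hau : Int := L.length
  let lar : Int := (PySem.List.pyGetD L 0 []).length
  -- the indexings L[i][j][k] are ported with pyGetD: inside Pre_ every index is in range,
  -- and outside Pre_ the Python raises IndexError, so the default is never observed there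
  (PySem.List.pyRange 0 hau 1).map (fun i =>
    (PySem.List.pyRange 0 lar 1).map (fun j =>
      (PySem.List.pyRange 0 3 1).map (fun k =>
        conv8 (PySem.List.pyGetD (PySem.List.pyGetD (PySem.List.pyGetD L i []) j []) k 0))))

-- ===== PRECONDITION & SPEC =====
-- Pre_ excludes exactly the inputs where the Python A raises IndexError: the empty list
-- (len(L[0])), a row shorter than len(L[0]), or a scanned pixel with fewer than 3 channels.
-- B raises IndexError on exactly the same inputs.
def Pre_convertisseur_jpeg_vers_binaire (L : List (List (List Int))) : Prop :=
  L ≠ [] ∧ ∀ row ∈ L, (L.headD []).length ≤ row.length ∧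
    ∀ px ∈ row.take (L.headD []).length, 3 ≤ px.length
instance (L : List (List (List Int))) : Decidable (Pre_convertisseur_jpeg_vers_binaire L) := by
  unfold Pre_convertisseur_jpeg_vers_binaire; infer_instance

def pvWitness_convertisseur_jpeg_vers_binaire : List (List (List Int)) := [[[0, 255, 7]]]

def Spec_convertisseur_jpeg_vers_binaire (L : List (List (List Int))) (out : List (List (List (List Int)))) : Prop := out = convertisseur_jpeg_vers_binaire_alt L
instance (L : List (List (List Int))) (out : List (List (List (List Int)))) : Decidable (Spec_convertisseur_jpeg_vers_binaire L out) := by unfold Spec_convertisseur_jpeg_vers_binaire; infer_instance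

-- ===== CLAIM (what is proved, stated in full; the proofs are below) =====
def Claim_equal_convertisseur_jpeg_vers_binaire : Prop := ∀ (L : List (List (List Int))), Dom_convertisseur_jpeg_vers_binaire L → Pre_convertisseur_jpeg_vers_binaire L → Spec_convertisseur_jpeg_vers_binaire L (convertisseur_jpeg_vers_binaire L)

-- ===== LEMMAS AND PROOFS =====

-- A's division loop computes exactly B's bit-extraction list
lemma conv_binaire_eq_conv8 (n : Int) : conv_binaire n = conv8 n := by
  simp only [conv_binaire, conv8,
    show PySem.List.pyRange 0 8 1 = [0,1,2,3,4,5,6,7] from rfl,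
    show PySem.List.pyRange 7 (-1) (-1) = [7,6,5,4,3,2,1,0] from rfl,
    List.foldl, List.map]
  norm_num [PySem.Int.mod_eq_emod_of_pos, PySem.Int.floordiv_eq_ediv_of_pos,
    Int.ediv_ediv_of_nonneg]
  norm_num [show Int.toNat 7 = 7 from rfl, show Int.toNat 6 = 6 from rfl,
    show Int.toNat 5 = 5 from rfl, show Int.toNat 4 = 4 from rfl,
    show Int.toNat 3 = 3 from rfl, show Int.toNat 2 = 2 from rfl]

-- B's per-pixel conversion, named for the proofs
def pvPix (px : List Int) : List (List Int) := (px.take 3).map (fun v => conv8 v)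

lemma pv_getD_last {α : Type} (l : List α) (x d : α) : (l ++ [x]).getD l.length d = x := by
  simp [List.getD]

lemma pv_set_last {α : Type} (l : List α) (x y : α) : (l ++ [x]).set l.length y = l ++ [y] := by
  induction l with
  | nil => rfl
  | cons a t ih => simp [ih]

-- the innermost k-loop fills the fresh placeholder with the three converted channels
lemma pv_kloop (L : List (List (List Int))) (M0 : List (List (List (List Int))))
    (pre : List (List (List Int))) (px0 : List Int) (a b c : Int) (rest : List Int)
    (hpx : px0 = a :: b :: c :: rest)
    (hL : PySem.List.pyGetD (PySem.List.pyGetD L (M0.length : Int) []) (pre.length : Int) [] = px0) :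
    (PySem.List.pyRange 0 3 1).foldl (fun M k =>
        let row := PySem.List.pyGetD M (M0.length : Int) []
        let px := PySem.List.pyGetD row (pre.length : Int) []
        let v := PySem.List.pyGetD (PySem.List.pyGetD (PySem.List.pyGetD L (M0.length : Int) []) (pre.length : Int) []) k 0
        PySem.List.pySetD M (M0.length : Int) (PySem.List.pySetD row (pre.length : Int) (PySem.List.pySetD px k (conv_binaire v))))
      (M0 ++ [pre ++ [[[],[],[]]]])
    = M0 ++ [pre ++ [pvPix px0]] := by
  subst hpx
  rw [show PySem.List.pyRange 0 3 1 = [0,1,2] from rfl]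
  simp only [List.foldl, hL]
  simp only [PySem.List.pyGetD_natCast, PySem.List.pySetD_natCast, pv_getD_last, pv_set_last]
  norm_num [PySem.List.pySetD, PySem.List.pySet?, PySem.List.pyGetD, PySem.List.pyGet?,
    PySem.List.pyIdx?, pvPix, conv_binaire_eq_conv8, List.set]
  simp only [if_pos (by omega : (0:Int) ≤ (rest.length:Int) + 1 + 1),
    if_pos (by omega : (0:Int) ≤ (rest.length:Int) + 1),
    if_pos (by omega : (2:Int) ≤ (rest.length:Int) + 1 + 1)]
  norm_num [List.set]
  rfl

-- the j-loop builds one output row, pixel by pixel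
lemma pv_jloop (L : List (List (List Int))) (M0 : List (List (List (List Int))))
    (target : List (List Int))
    (hT : PySem.List.pyGetD L (M0.length : Int) [] = target)
    (m : Nat) (hm : m ≤ target.length) (hpx : ∀ px ∈ target.take m, 3 ≤ px.length) :
    (PySem.List.pyRange 0 (m : Int) 1).foldl (fun M j =>
        let M' := PySem.List.pySetD M (M0.length : Int)
          (PySem.List.pyGetD M (M0.length : Int) [] ++ [[[],[],[]]])
        (PySem.List.pyRange 0 3 1).foldl (fun M k =>
          let row := PySem.List.pyGetD M (M0.length : Int) []
          let px := PySem.List.pyGetD row j []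
          let v := PySem.List.pyGetD (PySem.List.pyGetD (PySem.List.pyGetD L (M0.length : Int) []) j []) k 0
          PySem.List.pySetD M (M0.length : Int) (PySem.List.pySetD row j (PySem.List.pySetD px k (conv_binaire v)))) M')
      (M0 ++ [([] : List (List (List Int)))])
    = M0 ++ [(target.take m).map pvPix] := by
  induction m with
  | zero =>
    rw [show PySem.List.pyRange (0:Int) (((0:Nat):Int)) 1 = [] from
      PySem.List.pyRange_one_eq_nil (by simp)]
    simp
  | succ m' ih =>
    have hm' : m' ≤ target.length := by omega
    have hpx' : ∀ px ∈ target.take m', 3 ≤ px.length := by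
      intro px h
      refine hpx px ?_
      have h2 : px ∈ List.take m' (List.take (m' + 1) target) := by
        rwa [List.take_take, min_eq_left (by omega)]
      exact List.mem_of_mem_take h2
    have hcast : ((m' + 1 : Nat) : Int) = (m' : Int) + 1 := by push_cast; ring
    rw [hcast, PySem.List.pyRange_one_succ_right (by positivity), List.foldl_append,
      ih hm' hpx']
    simp only [List.foldl]
    have hpre : ((target.take m').map pvPix).length = m' := by
      simp [List.length_take, Nat.min_eq_left hm']
    have hmem : target.getD m' [] ∈ target.take (m' + 1) := by
      rw [List.getD_eq_getElem?_getD, List.getElem?_eq_getElem (by omega)]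
      simp only [Option.getD_some]
      exact List.mem_take_iff_getElem.mpr ⟨m', by omega, rfl⟩
    have h3 : 3 ≤ (target.getD m' []).length := hpx _ hmem
    obtain ⟨a, b, c, rest, hpx0⟩ : ∃ a b c rest, target.getD m' [] = a :: b :: c :: rest := by
      match hx : target.getD m' [] with
      | a :: b :: c :: rest => exact ⟨a, b, c, rest, rfl⟩
      | [] | [_] | [_, _] => rw [hx] at h3; simp at h3
    have hstate : PySem.List.pySetD (M0 ++ [(target.take m').map pvPix]) (M0.length : Int)
        (PySem.List.pyGetD (M0 ++ [(target.take m').map pvPix]) (M0.length : Int) [] ++ [[[],[],[]]])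
        = M0 ++ [(target.take m').map pvPix ++ [[[],[],[]]]] := by
      simp only [PySem.List.pyGetD_natCast, PySem.List.pySetD_natCast, pv_getD_last, pv_set_last]
    have hstep := pv_kloop L M0 ((target.take m').map pvPix) (target.getD m' []) a b c rest hpx0
      (by rw [hT, hpre, PySem.List.pyGetD_natCast])
    rw [hpre] at hstep
    rw [hstate, hstep]
    have htake : target.take (m' + 1) = target.take m' ++ [target.getD m' []] := by
      rw [List.take_add_one, List.getD_eq_getElem?_getD, List.getElem?_eq_getElem (by omega)]
      rfl
    rw [htake, List.map_append]
    simp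

-- the i-loop builds the rows one by one
lemma pv_outer (L : List (List (List Int)))
    (hrows : ∀ row ∈ L, (L.headD []).length ≤ row.length ∧
      ∀ px ∈ row.take (L.headD []).length, 3 ≤ px.length)
    (m : Nat) (hm : m ≤ L.length) :
    (PySem.List.pyRange 0 (m : Int) 1).foldl (fun M i =>
        (PySem.List.pyRange 0 (((L.headD []).length : Nat) : Int) 1).foldl (fun M j =>
          let M' := PySem.List.pySetD M i (PySem.List.pyGetD M i [] ++ [[[],[],[]]])
          (PySem.List.pyRange 0 3 1).foldl (fun M k =>
            let row := PySem.List.pyGetD M i []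
            let px := PySem.List.pyGetD row j []
            let v := PySem.List.pyGetD (PySem.List.pyGetD (PySem.List.pyGetD L i []) j []) k 0
            PySem.List.pySetD M i (PySem.List.pySetD row j (PySem.List.pySetD px k (conv_binaire v)))) M')
          (M ++ [([] : List (List (List Int)))]))
      []
    = (L.take m).map (fun row => (row.take (L.headD []).length).map pvPix) := by
  induction m with
  | zero =>
    rw [show PySem.List.pyRange (0:Int) (((0:Nat):Int)) 1 = [] from
      PySem.List.pyRange_one_eq_nil (by simp)]
    simp
  | succ m' ih =>
    have hm' : m' ≤ L.length := by omega
    have hcast : ((m' + 1 : Nat) : Int) = (m' : Int) + 1 := by push_cast; ring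
    rw [hcast, PySem.List.pyRange_one_succ_right (by positivity), List.foldl_append, ih hm']
    simp only [List.foldl]
    have hlen : ((L.take m').map (fun row => (row.take (L.headD []).length).map pvPix)).length = m' := by
      simp [List.length_take, Nat.min_eq_left hm']
    have hmemL : L.getD m' [] ∈ L := by
      rw [List.getD_eq_getElem?_getD, List.getElem?_eq_getElem (by omega)]
      exact List.getElem_mem _
    obtain ⟨hw, hp⟩ := hrows _ hmemL
    have hstep := pv_jloop L ((L.take m').map (fun row => (row.take (L.headD []).length).map pvPix))
      (L.getD m' []) (by rw [hlen, PySem.List.pyGetD_natCast]) (L.headD []).length hw hp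
    rw [hlen] at hstep
    rw [hstep]
    have : L.take (m' + 1) = L.take m' ++ [L.getD m' []] := by
      rw [List.take_add_one, List.getD_eq_getElem?_getD, List.getElem?_eq_getElem (by omega)]
      rfl
    rw [this, List.map_append]
    simp

lemma pv_head (L : List (List (List Int))) : PySem.List.pyGetD L 0 [] = L.headD [] := by
  cases L <;> simp [PySem.List.pyGetD, PySem.List.pyGet?, PySem.List.pyIdx?]

-- range(n) indexing into a list of length ≥ n is mapping over its n-prefix
lemma pv_idx_map {α β : Type} (xs : List α) (d : α) (g : α → β) (n : Nat) (h : n ≤ xs.length) :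
    (PySem.List.pyRange 0 (n : Int) 1).map (fun i => g (PySem.List.pyGetD xs i d))
      = (xs.take n).map g := by
  rw [PySem.List.pyRange_one]
  simp only [Int.sub_zero, Int.toNat_natCast, List.map_map]
  refine List.ext_getElem (by simp [h]) (fun k hk1 hk2 => ?_)
  simp only [List.getElem_map, List.getElem_range, Function.comp_apply, List.getElem_take]
  have hk : k < n := by simpa using hk1
  rw [show (0:Int) + (k:Int) = ((k:Nat):Int) by omega, PySem.List.pyGetD_natCast,
    List.getD_eq_getElem?_getD, List.getElem?_eq_getElem (by omega)]
  rfl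

-- ===== VERDICT (by name: the statement is the Claim_ definition above) =====
theorem convertisseur_jpeg_vers_binaire_spec : Claim_equal_convertisseur_jpeg_vers_binaire := by
  intro L _ hpre
  unfold Spec_convertisseur_jpeg_vers_binaire convertisseur_jpeg_vers_binaire
    convertisseur_jpeg_vers_binaire_alt
  simp only [pv_head]
  rw [pv_outer L hpre.2 L.length (le_refl _), List.take_length]
  rw [pv_idx_map L []
    (fun row => (PySem.List.pyRange 0 ((((L.headD []).length : Nat)) : Int) 1).map (fun j =>
      (PySem.List.pyRange 0 3 1).map (fun k =>
        conv8 (PySem.List.pyGetD (PySem.List.pyGetD row j []) k 0))))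
    L.length (le_refl _), List.take_length]
  refine (List.map_congr_left (fun row hrow => ?_)).symm
  obtain ⟨hw, hp⟩ := hpre.2 row hrow
  rw [pv_idx_map row []
    (fun px => (PySem.List.pyRange 0 3 1).map (fun k => conv8 (PySem.List.pyGetD px k 0)))
    (L.headD []).length hw]
  refine List.map_congr_left (fun px hpxm => ?_)
  have h3 : 3 ≤ px.length := hp px hpxm
  rw [show ((3:Int)) = ((3:Nat):Int) by norm_num, pv_idx_map px 0 conv8 3 h3]
  rfl
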